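-- pv_equiv track=rewrite | github.com/LoriGaetani/docling | docling_pipeline.py | _find_repeated_footer_lines
-- ===== SOURCE A (Python) =====
-- from typing import List, Tuple, Optional, Set, Union
-- from collections import Counter
--
-- def _normalize_line(line: str) -> str:
--     return " ".join(line.split()).strip()
--
-- def _find_repeated_footer_lines(
--     lines: List[str], min_repetitions: int = 3
-- ) -> Set[str]:
--     counter: Counter[str] = Counter()
--     for line in lines:
--         norm = _normalize_line(line)
--         if norm.isdigit():
--             counter[norm] += 1
--
--     return {v for v, c in counter.items() if c >= min_repetitions}
-- ===== SOURCE B (Python) =====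
-- from typing import List, Set
--
--
-- def _normalize_line(line: str) -> str:
--     return " ".join(line.split()).strip()
--
--
-- def _find_repeated_footer_lines(
--     lines: List[str], min_repetitions: int = 3
-- ) -> Set[str]:
--     # Partition-based: repeatedly take the first remaining normalized digit
--     # value, split the worklist into its run and the rest, and keep the value
--     # when its run reaches the threshold.  No counter/hash tally at all.
--     nums = [n for n in (_normalize_line(l) for l in lines) if n.isdigit()]
--     found: Set[str] = set()
--     while nums:
--         v = nums[0]
--         run = [x for x in nums if x == v]
--         nums = [x for x in nums if x != v]
--         if len(run) >= min_repetitions: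
--             found.add(v)
--     return found
-- ===== Notes on version B (the rewrite author's own statement) =====
-- stated objective: alternative
-- what changed: Replaces the Counter hash-tally plus dict-items filter by a shrinking-worklist partition: repeatedly take the first remaining normalized digit value, split the worklist into its run and the rest, and emit the value when the run length reaches the threshold.
import Mathlib
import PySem

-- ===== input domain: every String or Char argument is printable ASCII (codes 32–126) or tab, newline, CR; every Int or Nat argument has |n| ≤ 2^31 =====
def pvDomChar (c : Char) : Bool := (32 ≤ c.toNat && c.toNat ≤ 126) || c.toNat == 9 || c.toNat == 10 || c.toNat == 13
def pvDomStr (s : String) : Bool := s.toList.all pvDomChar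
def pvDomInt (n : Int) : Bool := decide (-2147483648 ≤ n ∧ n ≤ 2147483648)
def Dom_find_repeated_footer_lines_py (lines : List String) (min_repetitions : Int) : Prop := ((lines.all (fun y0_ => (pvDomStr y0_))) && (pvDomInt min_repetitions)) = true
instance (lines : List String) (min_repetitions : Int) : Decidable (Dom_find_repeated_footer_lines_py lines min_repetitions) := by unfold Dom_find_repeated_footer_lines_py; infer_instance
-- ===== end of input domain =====

-- B replaces A's Counter tally by a shrinking-worklist partition; equal output, no speed claim.

-- ===== PORT A =====
-- _normalize_line(line) = " ".join(line.split()).strip()   (shared helper; both Pythons call it)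
def normLine (s : String) : String :=
  PySem.Str.strip (PySem.Str.join " " (PySem.Str.split₀ s))

-- literal port of A: Counter loop, then the set comprehension over counter.items()
def find_repeated_footer_lines_py (lines : List String) (min_repetitions : Int) : List String :=
  let counter : PySem.Dict String Int :=
    lines.foldl (fun c line =>
      let norm := normLine line
      if PySem.Str.strIsdigit norm then c.modify norm 0 (· + 1) else c)
      PySem.Dict.empty
  PySem.Set.ofList
    (((counter.items).filter (fun vc => decide (min_repetitions ≤ vc.2))).map (·.1))

-- ===== PORT B =====
-- the 'while nums:' loop of Source B: partition the worklist on its head value each step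
def partGo (m : Int) (found : PySem.Set String) : List String → PySem.Set String
  | [] => found
  | v :: rest =>
      let run := (v :: rest).filter (fun x => x == v)
      let nums' := (v :: rest).filter (fun x => x != v)
      partGo m (if m ≤ (run.length : Int) then PySem.Set.add found v else found) nums'
termination_by nums => nums.length
decreasing_by
  simp only [List.filter, bne_self_eq_false]
  exact Nat.lt_succ_of_le (List.length_filter_le _ _)

-- literal port of Source B: build the normalized digit list, then the partition loop
def find_repeated_footer_lines_py_alt (lines : List String) (min_repetitions : Int) : List String :=
  let nums := (lines.map normLine).filter (fun n => PySem.Str.strIsdigit n)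
  partGo min_repetitions PySem.Set.empty nums

-- ===== PRECONDITION & SPEC =====
def Spec_find_repeated_footer_lines_py (lines : List String) (min_repetitions : Int) (out : List String) : Prop := out = find_repeated_footer_lines_py_alt lines min_repetitions
instance (lines : List String) (min_repetitions : Int) (out : List String) : Decidable (Spec_find_repeated_footer_lines_py lines min_repetitions out) := by unfold Spec_find_repeated_footer_lines_py; infer_instance

-- ===== CLAIM (what is proved, stated in full; the proofs are below) =====
def Claim_equal_find_repeated_footer_lines_py : Prop := ∀ (lines : List String) (min_repetitions : Int), Dom_find_repeated_footer_lines_py lines min_repetitions → Spec_find_repeated_footer_lines_py lines min_repetitions (find_repeated_footer_lines_py lines min_repetitions)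

-- ===== LEMMAS AND PROOFS =====

-- A's Counter loop over lines IS PySem.Dict.counter of the filtered normalized list
lemma counterA_eq (lines : List String) :
    (lines.foldl (fun c line =>
        let norm := normLine line
        if PySem.Str.strIsdigit norm then c.modify norm 0 (· + 1) else c)
        PySem.Dict.empty)
      = PySem.Dict.counter ((lines.map normLine).filter (fun n => PySem.Str.strIsdigit n)) := by
  rw [PySem.Dict.counter_eq_foldl, List.foldl_filter, List.foldl_map]

-- A's set from counter.items equals first-occurrence dedup filtered by count
lemma sideA_eq (nums : List String) (m : Int) :
    PySem.Set.ofList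
      ((((PySem.Dict.counter nums).items).filter (fun vc => decide (m ≤ vc.2))).map (·.1))
      = (PySem.List.dedup nums).filter (fun v => decide (m ≤ (nums.count v : Int))) := by
  rw [PySem.Dict.items_counter, List.filter_map]
  simp only [Function.comp_def, List.map_map]
  simp only [List.map_id', ← PySem.List.dedup_eq_ofList]
  rw [PySem.List.dedup_eq_ofList (List.filter _ (PySem.List.dedup nums))]
  exact PySem.Set.ofList_eq_self_of_nodup _ ((PySem.List.nodup_dedup nums).filter _)

-- Set.add on a non-member appends; on a member is the identity
lemma set_add_not_mem (s : List String) (v : String) (h : v ∉ s) :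
    PySem.Set.add s v = s ++ [v] := by
  simp [PySem.Set.add, PySem.Set.contains, h]

lemma set_add_mem (s : List String) (v : String) (h : v ∈ s) :
    PySem.Set.add s v = s := by
  simp [PySem.Set.add, PySem.Set.contains, h]

-- once v is in the accumulator, occurrences of v in the remaining fold are no-ops
lemma addGo (v : String) :
    ∀ (rest : List String) (s : List String), v ∈ s →
      rest.foldl PySem.Set.add s = (rest.filter (fun x => x != v)).foldl PySem.Set.add s := by
  intro rest
  induction rest with
  | nil => intro s _; rfl
  | cons x rest ih =>
      intro s hv
      by_cases hx : x = v
      · subst hx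
        have hfil : List.filter (fun y => y != x) (x :: rest)
            = List.filter (fun y => y != x) rest := by simp
        rw [hfil, List.foldl_cons, set_add_mem s x hv]
        exact ih s hv
      · have hcond : (x != v) = true := by simp [bne_iff_ne, hx]
        rw [List.filter_cons, if_pos hcond, List.foldl_cons, List.foldl_cons]
        refine ih _ ?_
        by_cases h2 : x ∈ s
        · rw [set_add_mem _ _ h2]; exact hv
        · rw [set_add_not_mem _ _ h2]; exact List.mem_append_left _ hv

-- a head element not occurring later stays at the head of the fold
lemma consGo (v : String) :
    ∀ (l : List String) (s : List String), (∀ x ∈ l, x ≠ v) →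
      l.foldl PySem.Set.add (v :: s) = v :: l.foldl PySem.Set.add s := by
  intro l
  induction l with
  | nil => intro s _; rfl
  | cons x l ih =>
      intro s h
      have hx : x ≠ v := h x (by simp)
      have hadd : PySem.Set.add (v :: s) x = v :: PySem.Set.add s x := by
        by_cases h2 : x ∈ s
        · rw [set_add_mem _ _ h2, set_add_mem _ _ (by simp [h2])]
        · rw [set_add_not_mem _ _ h2, set_add_not_mem _ _ (by simp [hx, h2])]
          rfl
      simp only [List.foldl_cons, hadd]
      exact ih _ (fun y hy => h y (by simp [hy]))

-- dedup of a cons: head, then dedup of the tail with the head's occurrences removed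
lemma dedup_cons_filter (v : String) (rest : List String) :
    PySem.List.dedup (v :: rest) = v :: PySem.List.dedup (rest.filter (fun x => x != v)) := by
  have h0 : PySem.Set.add [] v = [v] := rfl
  rw [PySem.List.dedup_eq_ofList, PySem.List.dedup_eq_ofList,
    PySem.Set.ofList_eq_foldl, PySem.Set.ofList_eq_foldl,
    List.foldl_cons, h0,
    addGo v rest [v] (by simp),
    consGo v _ [] (by intro x hx; simp only [List.mem_filter, bne_iff_ne] at hx; exact hx.2)]

-- counts of x ≠ v are unchanged by filtering v out
lemma count_filter_ne (x v : String) (l : List String) (h : x ≠ v) :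
    (l.filter (fun y => y != v)).count x = l.count x := by
  rw [List.count_filter (by simp [bne_iff_ne, h])]

-- partGo computes: accumulator ++ dedup-filter-by-count, when nums avoids the accumulator
lemma partGo_eq (m : Int) (nums : List String) (found : PySem.Set String)
    (h : ∀ x ∈ nums, x ∉ found) :
    partGo m found nums
      = found ++ (PySem.List.dedup nums).filter (fun v => decide (m ≤ (nums.count v : Int))) := by
  fun_induction partGo m found nums with
  | case1 found => simp [PySem.List.dedup]
  | case2 found v rest run nums' ih =>
      have hvf : v ∉ found := h v (by simp)
      have hnf : nums' = rest.filter (fun x => x != v) := by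
        simp [nums']
      have hrun : run.length = (v :: rest).count v := by
        show (List.filter (fun x => x == v) (v :: rest)).length = _
        rw [← List.countP_eq_length_filter]
        rfl
      have hmemf : ∀ x ∈ rest.filter (fun y => y != v), x ≠ v := by
        intro x hx
        simp only [List.mem_filter, bne_iff_ne] at hx
        exact hx.2
      have hrec := ih (by
        intro x hx
        rw [hnf] at hx
        have hxv : x ≠ v := hmemf x hx
        have hxr : x ∈ (v :: rest) := List.mem_cons_of_mem _ (List.mem_filter.mp hx).1
        by_cases hm : m ≤ (run.length : Int)
        · rw [dif_pos hm, set_add_not_mem _ _ hvf]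
          simp [h x hxr, hxv]
        · rw [dif_neg hm]; exact h x hxr)
      rw [← dite_eq_ite, hrec, hnf, dedup_cons_filter, List.filter_cons]
      have hfc : (PySem.List.dedup (rest.filter (fun x => x != v))).filter
            (fun x => decide (m ≤ ((rest.filter (fun y => y != v)).count x : Int)))
          = (PySem.List.dedup (rest.filter (fun x => x != v))).filter
            (fun x => decide (m ≤ ((v :: rest).count x : Int))) := by
        apply List.filter_congr
        intro x hx
        have hxv : x ≠ v := hmemf x ((PySem.List.mem_dedup _ _).mp hx)
        rw [count_filter_ne _ _ _ hxv]
        simp [Ne.symm hxv]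
      rw [hfc]
      by_cases hm : m ≤ (run.length : Int)
      · rw [dif_pos hm, set_add_not_mem _ _ hvf, if_pos (by rw [← hrun]; simpa using hm)]
        simp
      · rw [dif_neg hm, if_neg (by rw [← hrun]; simpa using hm)]

-- ===== VERDICT (by name: the statement is the Claim_ definition above) =====
theorem find_repeated_footer_lines_py_spec : Claim_equal_find_repeated_footer_lines_py := by
  intro lines m _
  unfold Spec_find_repeated_footer_lines_py
  unfold find_repeated_footer_lines_py find_repeated_footer_lines_py_alt
  rw [counterA_eq, sideA_eq, partGo_eq m _ _ (by intro x hx; simp [PySem.Set.empty])]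
  simp
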